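-- pv_equiv track=rewrite | github.com/mrmzyking/study1 | studytorch/BalanceDataSets.py | getImageFilePath
-- ===== SOURCE A (Python) =====
-- def getImageFilePath(path):
--     retpath = ""
--     if isinstance(path, str):
--         tmppath = path
--         tmplist = tmppath.split("\\")
--         newpath = tmplist[0:-1]
--         for i in newpath:
--             retpath += i + "\\"
--     return retpath
-- ===== SOURCE B (Python) =====
-- def getImageFilePath(path):
--     if not isinstance(path, str):
--         return ""
--     return path[:path.rfind("\\") + 1]
-- ===== Notes on version B (the rewrite author's own statement) =====
-- stated objective: simpler
-- what changed: Replaces split-into-list, slice-off-last and an accumulator rejoin loop by a single rfind of the last backslash and one slice up to and including it.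
import Mathlib
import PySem

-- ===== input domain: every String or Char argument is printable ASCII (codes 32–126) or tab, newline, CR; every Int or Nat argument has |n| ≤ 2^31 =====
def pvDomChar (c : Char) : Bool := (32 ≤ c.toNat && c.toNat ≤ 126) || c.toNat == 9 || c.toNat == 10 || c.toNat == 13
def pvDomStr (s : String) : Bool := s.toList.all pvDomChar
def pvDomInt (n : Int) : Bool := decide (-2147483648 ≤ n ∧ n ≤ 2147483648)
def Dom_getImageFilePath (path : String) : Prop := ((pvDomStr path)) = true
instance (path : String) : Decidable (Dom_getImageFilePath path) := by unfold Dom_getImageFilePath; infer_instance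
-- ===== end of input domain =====

-- B replaces A's split / drop-last / rejoin-with-'\'-accumulator loop by one rfind of the
-- last backslash and a single slice up to and including it (objective: simpler).
-- (In Lean the argument is always a String, so A's `isinstance(path, str)` guard is always taken.)

-- ===== PORT A =====
-- retpath = ""; tmplist = path.split("\\"); newpath = tmplist[0:-1]; for i in newpath: retpath += i + "\\"
def getImageFilePath (path : String) : String :=
  let retpath : List Char := []
  let tmppath : List Char := path.toList
  let tmplist : List (List Char) := PySem.Chars.splitOn tmppath ['\\']
  let newpath : List (List Char) := PySem.List.slice tmplist none (some (-1))
  String.ofList (newpath.foldl (fun retpath i => retpath ++ i ++ ['\\']) retpath)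

-- ===== PORT B =====
-- return path[:path.rfind("\\") + 1]
def getImageFilePath_alt (path : String) : String :=
  String.ofList
    (PySem.List.slice path.toList none (some (PySem.Chars.rfind path.toList ['\\'] + 1)))

-- ===== PRECONDITION & SPEC =====
def Spec_getImageFilePath (path : String) (out : String) : Prop := out = getImageFilePath_alt path
instance (path : String) (out : String) : Decidable (Spec_getImageFilePath path out) := by unfold Spec_getImageFilePath; infer_instance

-- ===== CLAIM (what is proved, stated in full; the proofs are below) =====
def Claim_equal_getImageFilePath : Prop := ∀ (path : String), Dom_getImageFilePath path → Spec_getImageFilePath path (getImageFilePath path)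

-- ===== LEMMAS AND PROOFS =====

-- Structural characterisation of splitting on the single character '\': head and tail of the pieces list.
def pvSp : List Char → List Char × List (List Char)
  | [] => ([], [])
  | x :: xs =>
    let p := pvSp xs
    if x = '\\' then ([], p.1 :: p.2) else (x :: p.1, p.2)

lemma pvSp_nil : pvSp [] = ([], []) := rfl

lemma pvSp_cons (x : Char) (xs : List Char) :
    pvSp (x :: xs) =
      if x = '\\' then ([], (pvSp xs).1 :: (pvSp xs).2)
      else (x :: (pvSp xs).1, (pvSp xs).2) := by
  by_cases h : x = '\\' <;> simp [pvSp, h]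

lemma splitOn_go_eq (fuel : Nat) :
    ∀ (l cur : List Char) (accl : List (List Char)), l.length < fuel →
      PySem.Chars.splitOn.go ['\\'] fuel l cur accl =
        accl.reverse ++ ((cur.reverse ++ (pvSp l).1) :: (pvSp l).2) := by
  induction fuel with
  | zero => intro l cur accl h; omega
  | succ n ih =>
    intro l cur accl h
    cases l with
    | nil => simp [PySem.Chars.splitOn.go, pvSp]
    | cons x xs =>
      by_cases hx : x = '\\'
      · subst hx
        have hpre : List.isPrefixOf ['\\'] ('\\' :: xs) = true := by
          simp [List.isPrefixOf]
        rw [PySem.Chars.splitOn.go]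
        simp only [hpre, if_true, List.length_cons, List.length_nil, List.drop_succ_cons,
          List.drop_zero]
        rw [ih xs [] (cur.reverse :: accl)
          (by simp only [List.length_cons] at h; omega)]
        simp [pvSp_cons]
      · have hpre : List.isPrefixOf ['\\'] (x :: xs) = false := by
          simp [List.isPrefixOf]
          intro hxx; exact hx hxx.symm
        rw [PySem.Chars.splitOn.go]
        simp only [hpre, Bool.false_eq_true, if_false]
        rw [ih xs (x :: cur) accl (by simpa using Nat.lt_of_succ_lt_succ h)]
        simp [pvSp_cons, hx]

lemma splitOn_eq (s : List Char) :
    PySem.Chars.splitOn s ['\\'] = (pvSp s).1 :: (pvSp s).2 := by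
  unfold PySem.Chars.splitOn
  rw [splitOn_go_eq (s.length + 1) s [] [] (by omega)]
  simp

-- rfind.go equations (single step), then the cons recursion.
lemma rfind_go_zero (s sub : List Char) :
    PySem.Chars.rfind.go s sub 0 = if sub.isPrefixOf s then (0 : Int) else -1 := by
  rw [PySem.Chars.rfind.go.eq_def]

lemma rfind_go_succ (s sub : List Char) (j : Nat) :
    PySem.Chars.rfind.go s sub (j + 1) =
      if sub.isPrefixOf (List.drop (j + 1) s) then ((j : Int) + 1)
      else PySem.Chars.rfind.go s sub j := by
  rw [PySem.Chars.rfind.go.eq_def]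
  push_cast
  ring_nf

lemma rfind_go_cons (x : Char) (xs : List Char) :
    ∀ j : Nat,
      PySem.Chars.rfind.go (x :: xs) ['\\'] (j + 1) =
        if PySem.Chars.rfind.go xs ['\\'] j = -1 then (if x = '\\' then (0 : Int) else -1)
        else PySem.Chars.rfind.go xs ['\\'] j + 1 := by
  intro j
  induction j with
  | zero =>
    rw [rfind_go_succ, rfind_go_zero, rfind_go_zero]
    simp only [List.drop_succ_cons, List.drop_zero]
    by_cases hp : List.isPrefixOf ['\\'] xs
    · have h0 : ¬ ((0 : Int) = -1) := by omega
      simp only [hp, if_true, h0, if_false]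
      norm_num
    · simp only [hp, Bool.false_eq_true, if_false]
      by_cases hx : x = '\\'
      · simp [hx]
      · have : List.isPrefixOf ['\\'] (x :: xs) = false := by
          simp [List.isPrefixOf]
          intro hxx; exact hx hxx.symm
        simp [this, hx]
  | succ j ih =>
    conv_lhs => rw [rfind_go_succ]
    conv_rhs => rw [rfind_go_succ]
    have hdrop : List.drop (j + 1 + 1) (x :: xs) = List.drop (j + 1) xs := by
      simp [List.drop_succ_cons]
    rw [hdrop]
    by_cases hp : List.isPrefixOf ['\\'] (List.drop (j + 1) xs)
    · simp only [hp, if_true]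
      have : ¬ (((j : Int) + 1) = -1) := by omega
      simp only [this, if_false]
      push_cast
      ring
    · simp only [hp, Bool.false_eq_true, if_false]
      exact ih

lemma rfind_nil : PySem.Chars.rfind [] ['\\'] = -1 := by
  unfold PySem.Chars.rfind
  simp only [List.length_nil]
  rw [rfind_go_zero]
  simp [List.isPrefixOf]

lemma rfind_cons (x : Char) (xs : List Char) :
    PySem.Chars.rfind (x :: xs) ['\\'] =
      if PySem.Chars.rfind xs ['\\'] = -1 then (if x = '\\' then (0 : Int) else -1)
      else PySem.Chars.rfind xs ['\\'] + 1 := by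
  unfold PySem.Chars.rfind
  exact rfind_go_cons x xs xs.length

lemma rfind_ge_neg_one (s : List Char) : -1 ≤ PySem.Chars.rfind s ['\\'] := by
  induction s with
  | nil => rw [rfind_nil]
  | cons x xs ih =>
    rw [rfind_cons]
    split_ifs <;> omega

-- pvSp's tail is empty exactly when rfind finds no backslash.
lemma sp_tail_nil_iff (s : List Char) :
    (pvSp s).2 = [] ↔ PySem.Chars.rfind s ['\\'] = -1 := by
  induction s with
  | nil => simp [pvSp_nil, rfind_nil]
  | cons x xs ih =>
    rw [pvSp_cons, rfind_cons]
    have hge := rfind_ge_neg_one xs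
    by_cases hx : x = '\\'
    · rw [if_pos hx, if_pos hx]
      constructor
      · intro h; exact absurd h (List.cons_ne_nil _ _)
      · intro h; exfalso; split_ifs at h
        all_goals omega
    · rw [if_neg hx, if_neg hx]
      rw [ih]
      split_ifs with h1
      · simp [h1]
      · constructor
        · intro h; exact absurd h h1
        · intro h; omega

-- The rejoin loop: pulling the accumulator out in front.
lemma foldl_join_init (l : List (List Char)) :
    ∀ a : List Char,
      l.foldl (fun r i => r ++ i ++ ['\\']) a =
        a ++ l.foldl (fun r i => r ++ i ++ ['\\']) [] := by
  induction l with
  | nil => intro a; simp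
  | cons h t ih =>
    intro a
    simp only [List.foldl_cons]
    rw [ih (a ++ h ++ ['\\']), ih (([] : List Char) ++ h ++ ['\\'])]
    simp

-- Main invariant: A's rejoined prefix equals the take up to the last backslash.
lemma main_chars (s : List Char) :
    (((pvSp s).1 :: (pvSp s).2).dropLast).foldl (fun r i => r ++ i ++ ['\\']) [] =
      List.take (PySem.Chars.rfind s ['\\'] + 1).toNat s := by
  induction s with
  | nil => simp [pvSp_nil, rfind_nil]
  | cons x xs ih =>
    have hge := rfind_ge_neg_one xs
    rw [pvSp_cons, rfind_cons]
    by_cases hx : x = '\\'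
    · simp only [hx, if_true]
      -- head piece is [], the rest of the pieces are all of pvSp xs
      have hd : (([] : List Char) :: (pvSp xs).1 :: (pvSp xs).2).dropLast =
          ([] : List Char) :: (((pvSp xs).1 :: (pvSp xs).2).dropLast) := by
        simp [List.dropLast_cons₂]
      rw [hd]
      simp only [List.foldl_cons, List.nil_append]
      rw [foldl_join_init]
      rw [ih]
      split_ifs with h1
      · rw [h1]; norm_num
      · have h0 : 0 ≤ PySem.Chars.rfind xs ['\\'] := by omega
        have : (PySem.Chars.rfind xs ['\\'] + 1 + 1).toNat =
            (PySem.Chars.rfind xs ['\\'] + 1).toNat + 1 := by omega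
        rw [this, List.take_succ_cons, List.singleton_append]
    · simp only [hx, if_false]
      by_cases h1 : PySem.Chars.rfind xs ['\\'] = -1
      · have ht : (pvSp xs).2 = [] := (sp_tail_nil_iff xs).mpr h1
        simp [ht, h1]
      · have ht : (pvSp xs).2 ≠ [] := fun h => h1 ((sp_tail_nil_iff xs).mp h)
        obtain ⟨t0, t1, het⟩ := List.exists_cons_of_ne_nil ht
        rw [het]
        have hd : ((x :: (pvSp xs).1) :: t0 :: t1).dropLast =
            (x :: (pvSp xs).1) :: ((t0 :: t1).dropLast) := by
          simp [List.dropLast_cons₂]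
        rw [hd]
        simp only [List.foldl_cons, List.nil_append]
        rw [foldl_join_init]
        have ihx := ih
        rw [het] at ihx
        have hd2 : ((pvSp xs).1 :: t0 :: t1).dropLast =
            (pvSp xs).1 :: ((t0 :: t1).dropLast) := by
          simp [List.dropLast_cons₂]
        rw [hd2] at ihx
        simp only [List.foldl_cons, List.nil_append] at ihx
        rw [foldl_join_init] at ihx
        simp only [h1, if_false]
        have : (PySem.Chars.rfind xs ['\\'] + 1 + 1).toNat =
            (PySem.Chars.rfind xs ['\\'] + 1).toNat + 1 := by omega
        rw [this, List.take_succ_cons, ← ihx]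
        simp

-- ===== VERDICT (by name: the statement is the Claim_ definition above) =====
theorem getImageFilePath_spec : Claim_equal_getImageFilePath := by
  intro path _
  simp only [Spec_getImageFilePath, getImageFilePath, getImageFilePath_alt]
  have hb : 0 ≤ PySem.Chars.rfind path.toList ['\\'] + 1 := by
    have := rfind_ge_neg_one path.toList; omega
  rw [PySem.List.slice_to _ hb]
  congr 1
  rw [splitOn_eq]
  rw [PySem.List.slice_to_neg_one]
  exact main_chars path.toList
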